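-- pv_equiv track=rewrite | github.com/PerkiePai/COMPROG-2110101 | Grader_Exercise/Grader 3/exercise/09_MoreDC_34.py | pattern6
-- ===== SOURCE A (Python) =====
-- def pattern6(N):
--     l1=[[] for i in range(N)]
--     for i in range(N):
--         for j in range(N-i-1):
--             l1[i].append(0)
--
--     row=0
--     cnt=1
--
--     max_cnt=0
--     for i in range(N+1):
--         max_cnt+=i
--
--     while cnt<max_cnt+1:
--         start=row
--         while row<N:
--             l1[row].append(cnt)
--             row+=1
--             cnt+=1
--         row-=1
--         while row>start:
--             l1[row].append(cnt)
--             row-=1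
--             cnt+=1
--         row+=2
--
--     out=[]
--     for i in range(N-1,-1,-1):
--         l2=[]
--         for j in range(N):
--             l2.append(l1[j].pop(-1))
--         out.append(l2)
--
--     return out
-- ===== SOURCE B (Python) =====
-- def pattern6(N):
--     total = N * (N + 1) // 2
--     def val(r, c):
--         if c < r:
--             return 0
--         d = c - r
--         base = total - (N - d) * (N - d + 1) // 2
--         return base + 1 + (r if d % 2 == 0 else N - 1 - d - r)
--     return [[val(r, c) for c in range(N)] for r in range(N)]
-- ===== Notes on version B (the rewrite author's own statement) =====
-- stated objective: simpler
-- what changed: A builds per-column lists with prefix zeros, fills them by a stateful snake walk over diagonals, then reconstructs the grid by popping every column N times; B computes each cell directly from a closed-form formula (triangular-number base of its diagonal plus position, alternating direction by diagonal parity) in one comprehension.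
import Mathlib
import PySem

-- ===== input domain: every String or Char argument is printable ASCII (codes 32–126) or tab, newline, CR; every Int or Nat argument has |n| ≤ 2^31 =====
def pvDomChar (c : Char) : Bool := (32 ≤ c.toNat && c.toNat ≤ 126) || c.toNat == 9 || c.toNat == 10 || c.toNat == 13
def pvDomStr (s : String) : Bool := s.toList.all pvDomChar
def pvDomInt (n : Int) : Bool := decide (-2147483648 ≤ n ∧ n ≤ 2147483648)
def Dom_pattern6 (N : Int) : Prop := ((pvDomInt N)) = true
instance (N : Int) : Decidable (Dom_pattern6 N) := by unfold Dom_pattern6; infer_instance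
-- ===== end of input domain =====

-- B replaces A's snake-walk over column lists plus pop-based transposition by a direct
-- per-cell closed-form formula (objective: simpler).

-- ===== PORT A =====
-- while row < N: l1[row].append(cnt); row += 1; cnt += 1
def pattern6Descend (N : Int) (l1 : List (List Int)) (row cnt : Int) :
    List (List Int) × Int × Int :=
  if _h : row < N then
    pattern6Descend N (PySem.List.pySetD l1 row (PySem.List.pyGetD l1 row [] ++ [cnt]))
      (row + 1) (cnt + 1)
  else (l1, row, cnt)
termination_by (N - row).toNat
decreasing_by omega

-- while row > start: l1[row].append(cnt); row -= 1; cnt += 1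
def pattern6Ascend (start : Int) (l1 : List (List Int)) (row cnt : Int) :
    List (List Int) × Int × Int :=
  if _h : start < row then
    pattern6Ascend start (PySem.List.pySetD l1 row (PySem.List.pyGetD l1 row [] ++ [cnt]))
      (row - 1) (cnt + 1)
  else (l1, row, cnt)
termination_by (row - start).toNat
decreasing_by omega

-- while cnt < max_cnt + 1: … (fuel only makes the loop total; N.toNat + 1 iterations
-- always suffice, the guard is what stops the loop)
def pattern6Loop (fuel : Nat) (N max_cnt : Int) (l1 : List (List Int)) (row cnt : Int) :
    List (List Int) :=
  match fuel with
  | 0 => l1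
  | f + 1 =>
    if cnt < max_cnt + 1 then
      let start := row
      let s1 := pattern6Descend N l1 row cnt
      let s2 := pattern6Ascend start s1.1 (s1.2.1 - 1) s1.2.2
      pattern6Loop f N max_cnt s2.1 (s2.2.1 + 2) s2.2.2
    else l1

def pattern6 (N : Int) : List (List Int) :=
  -- l1 = [[] for i in range(N)]; nested zero-filling loops
  let l1 := (PySem.List.pyRange 0 N 1).map (fun _ => ([] : List Int))
  let l1 := (PySem.List.pyRange 0 N 1).foldl (fun l1 i =>
    (PySem.List.pyRange 0 (N - i - 1) 1).foldl (fun l1 _j =>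
      PySem.List.pySetD l1 i (PySem.List.pyGetD l1 i [] ++ [(0 : Int)])) l1) l1
  let max_cnt := (PySem.List.pyRange 0 (N + 1) 1).foldl (fun m i => m + i) 0
  let l1 := pattern6Loop (N.toNat + 1) N max_cnt l1 0 1
  -- for i in range(N-1, -1, -1): l2 = [l1[j].pop(-1) for j in range(N)]; out.append(l2)
  let st := (PySem.List.pyRange (N - 1) (-1) (-1)).foldl (fun st _i =>
    let inner := (PySem.List.pyRange 0 N 1).foldl (fun (acc : List Int × List (List Int)) j =>
      match PySem.List.pop? (PySem.List.pyGetD acc.2 j []) (-1) with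
      | some (v, rest) => (acc.1 ++ [v], PySem.List.pySetD acc.2 j rest)
      | none => acc  -- Python would raise IndexError here; unreachable for every input
      ) (([] : List Int), st.2)
    (st.1 ++ [inner.1], inner.2)) (([] : List (List Int)), l1)
  st.1

-- ===== PORT B =====
def pattern6AltVal (N total r c : Int) : Int :=
  if c < r then 0
  else
    let d := c - r
    let base := total - PySem.Int.floordiv ((N - d) * (N - d + 1)) 2
    base + 1 + (if PySem.Int.mod d 2 == 0 then r else N - 1 - d - r)

def pattern6_alt (N : Int) : List (List Int) :=
  let total := PySem.Int.floordiv (N * (N + 1)) 2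
  (PySem.List.pyRange 0 N 1).map (fun r =>
    (PySem.List.pyRange 0 N 1).map (fun c => pattern6AltVal N total r c))

-- ===== PRECONDITION & SPEC =====
def Spec_pattern6 (N : Int) (out : List (List Int)) : Prop := out = pattern6_alt N
instance (N : Int) (out : List (List Int)) : Decidable (Spec_pattern6 N out) := by unfold Spec_pattern6; infer_instance

-- ===== CLAIM (what is proved, stated in full; the proofs are below) =====
def Claim_equal_pattern6 : Prop := ∀ (N : Int), Dom_pattern6 N → Spec_pattern6 N (pattern6 N)

-- ===== LEMMAS AND PROOFS =====

-- Sum of the first d snake-diagonal lengths (cells numbered before diagonal d).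
def pvBase (N : Int) : Nat → Int
  | 0 => 0
  | d + 1 => pvBase N d + (N - d)

-- The values appended to column j, in chronological order (one per diagonal a = 0..j).
def pvApps (N : Int) (j : Nat) : List Int :=
  (List.range (j + 1)).map (fun a =>
    pvBase N a + 1 + (if a % 2 = 0 then (j : Int) - a else N - 1 - j))

-- Column j of A's l1 after m outer iterations: prefix zeros plus the first m appends.
def pvCol (N : Int) (n j m : Nat) : List Int :=
  List.replicate (n - 1 - j) 0 ++ (pvApps N j).take m

def pvGrid (N : Int) (n m : Nat) : List (List Int) :=
  (List.range n).map (fun j => pvCol N n j m)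

lemma pv_set_range_map {α : Type} (n r : Nat) (f : Nat → α) (v : α) (hr : r < n) :
    ((List.range n).map f).set r v = (List.range n).map (fun j => if j = r then v else f j) := by
  apply List.ext_getElem <;> simp [List.getElem_set]
  intro i hi
  rcases eq_or_ne i r with h | h
  · simp [h]
  · simp [h, h.symm]

lemma pv_len_pvApps (N : Int) (j : Nat) : (pvApps N j).length = j + 1 := by
  simp [pvApps]

lemma pv_getElem?_pvApps (N : Int) (j a : Nat) (ha : a < j + 1) :
    (pvApps N j)[a]? = some (pvBase N a + 1 + (if a % 2 = 0 then (j : Int) - a else N - 1 - j)) := by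
  simp [pvApps, List.getElem?_map, List.getElem?_range, ha]

lemma pv_descend_char (N : Int) (n : Nat) (hN : N = (n : Int)) (k : Nat) :
    ∀ (r : Nat) (f : Nat → List Int) (cnt : Int), r + k = n →
    pattern6Descend N ((List.range n).map f) (r : Int) cnt
      = ((List.range n).map (fun j => if r ≤ j then f j ++ [cnt + ((j : Int) - r)] else f j),
         N, cnt + ((n : Int) - r)) := by
  induction k with
  | zero =>
    intro r f cnt hr
    rw [pattern6Descend]
    have : ¬ ((r : Int) < N) := by omega
    simp only [this, dif_neg, not_false_iff]
    simp only [Prod.mk.injEq]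
    refine ⟨?_, by omega, by omega⟩
    apply List.map_congr_left
    intro j hj
    simp only [List.mem_range] at hj
    have : ¬ (r ≤ j) := by omega
    simp [this]
  | succ k ih =>
    intro r f cnt hr
    rw [pattern6Descend]
    have hlt : (r : Int) < N := by omega
    simp only [hlt, dif_pos]
    have hrn : r < n := by omega
    rw [show (PySem.List.pyGetD ((List.range n).map f) (r : Int) []) = f r by
          simp [PySem.List.pyGetD_natCast, List.getD, List.getElem?_range, hrn]]
    rw [show (PySem.List.pySetD ((List.range n).map f) (r : Int) (f r ++ [cnt]))
          = (List.range n).map (fun j => if j = r then f r ++ [cnt] else f j) by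
          simp [PySem.List.pySetD_natCast, pv_set_range_map n r f _ hrn]]
    rw [show ((r : Int) + 1) = ((r + 1 : Nat) : Int) by push_cast; ring]
    rw [ih (r + 1) _ (cnt + 1) (by omega)]
    simp only [Prod.mk.injEq]
    refine ⟨?_, by trivial, by push_cast; ring⟩
    apply List.map_congr_left
    intro j hj
    simp only [List.mem_range] at hj
    by_cases h1 : j = r
    · subst h1
      have : ¬ (j + 1 ≤ j) := by omega
      simp [this]
    · by_cases h2 : r + 1 ≤ j
      · have : r ≤ j := by omega
        simp [h1, h2, this]
        push_cast; ring
      · have : ¬ (r ≤ j) := by omega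
        simp [h1, h2, this]

lemma pv_ascend_char (n s : Nat) (k : Nat) :
    ∀ (r : Nat) (f : Nat → List Int) (cnt : Int), s + k = r → r < n →
    pattern6Ascend (s : Int) ((List.range n).map f) (r : Int) cnt
      = ((List.range n).map (fun j => if s < j ∧ j ≤ r then f j ++ [cnt + ((r : Int) - j)] else f j),
         (s : Int), cnt + ((r : Int) - s)) := by
  induction k with
  | zero =>
    intro r f cnt hr hrn
    rw [pattern6Ascend]
    have : ¬ ((s : Int) < (r : Int)) := by omega
    simp only [this, dif_neg, not_false_iff]
    simp only [Prod.mk.injEq]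
    refine ⟨?_, by omega, by omega⟩
    apply List.map_congr_left
    intro j hj
    have : ¬ (s < j ∧ j ≤ r) := by omega
    simp [this]
  | succ k ih =>
    intro r f cnt hr hrn
    rw [pattern6Ascend]
    have hlt : (s : Int) < (r : Int) := by omega
    simp only [hlt, dif_pos]
    rw [show (PySem.List.pyGetD ((List.range n).map f) (r : Int) []) = f r by
          simp [PySem.List.pyGetD_natCast, List.getD, List.getElem?_range, hrn]]
    rw [show (PySem.List.pySetD ((List.range n).map f) (r : Int) (f r ++ [cnt]))
          = (List.range n).map (fun j => if j = r then f r ++ [cnt] else f j) by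
          simp [PySem.List.pySetD_natCast, pv_set_range_map n r f _ hrn]]
    rw [show ((r : Int) - 1) = ((r - 1 : Nat) : Int) by omega]
    rw [ih (r - 1) _ (cnt + 1) (by omega) (by omega)]
    simp only [Prod.mk.injEq]
    refine ⟨?_, by trivial, by omega⟩
    apply List.map_congr_left
    intro j hj
    simp only [List.mem_range] at hj
    by_cases h1 : j = r
    · subst h1
      have h2 : ¬ (s < j ∧ j ≤ j - 1) := by omega
      have h3 : s < j ∧ j ≤ j := by omega
      simp [h2, h3]
      omega
    · by_cases h2 : s < j ∧ j ≤ r - 1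
      · have h3 : s < j ∧ j ≤ r := by omega
        simp [h1, h2, h3]
        omega
      · have h3 : ¬ (s < j ∧ j ≤ r) := by omega
        simp [h1, h2, h3]

lemma pv_pvBase_lt (N : Int) (n : Nat) (hN : N = (n : Int)) :
    ∀ a b : Nat, a < b → b ≤ n → pvBase N a < pvBase N b := by
  intro a b hab hbn
  induction b with
  | zero => omega
  | succ b ih =>
    rw [pvBase]
    have hb : (N - (b : Int)) > 0 := by omega
    rcases Nat.lt_succ_iff_lt_or_eq.mp hab with h | h
    · have := ih h (by omega); omega
    · subst h; omega

lemma pv_pvBase_top (N : Int) (n : Nat) (hN : N = (n : Int)) :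
    pvBase N (n + 1) = pvBase N n := by
  rw [pvBase]; omega

lemma pv_take_saturate (N : Int) (n j m : Nat) (h : j + 1 ≤ m) :
    (pvApps N j).take m = pvApps N j := by
  apply List.take_of_length_le
  rw [pv_len_pvApps]; omega

lemma pv_grid_sat (N : Int) (n m : Nat) (h : n ≤ m) : pvGrid N n m = pvGrid N n n := by
  unfold pvGrid pvCol
  apply List.map_congr_left
  intro j hj
  simp only [List.mem_range] at hj
  rw [pv_take_saturate N n j m (by omega), pv_take_saturate N n j n (by omega)]

lemma pv_col_push (N : Int) (n j m : Nat) (h : m < j + 1) :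
    pvCol N n j m ++ [pvBase N m + 1 + (if m % 2 = 0 then (j : Int) - m else N - 1 - j)]
      = pvCol N n j (m + 1) := by
  unfold pvCol
  rw [List.append_assoc]
  congr 1
  rw [List.take_succ, pv_getElem?_pvApps N j m h]
  rfl

-- one loop iteration turns pvGrid m into pvGrid (m+1)
lemma pv_loop_char (N : Int) (n : Nat) (hN : N = (n : Int)) :
    ∀ (fuel m : Nat), n ≤ 2 * m + 2 * fuel → 2 * m ≤ n + 1 →
    pattern6Loop fuel N (pvBase N n) (pvGrid N n (2 * m)) ((2 * m : Nat) : Int) (pvBase N (2 * m) + 1)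
      = pvGrid N n n := by
  intro fuel
  induction fuel with
  | zero =>
    intro m hfu hm
    rw [pattern6Loop, pv_grid_sat N n (2 * m) (by omega)]
  | succ f ih =>
    intro m hfu hm
    by_cases h2m : 2 * m < n
    · have hguard : pvBase N (2 * m) + 1 < pvBase N n + 1 := by
        have := pv_pvBase_lt N n hN (2 * m) n h2m (by omega)
        omega
      rw [pattern6Loop]
      simp only [hguard, if_pos]
      rw [show pvGrid N n (2 * m) = (List.range n).map (fun j => pvCol N n j (2 * m)) from rfl]
      rw [pv_descend_char N n hN (n - 2 * m) (2 * m) _ _ (by omega)]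
      simp only
      rw [show (N - 1) = ((n - 1 : Nat) : Int) by omega]
      rw [pv_ascend_char n (2 * m) (n - 1 - 2 * m) (n - 1) _ _ (by omega) (by omega)]
      simp only
      have hgrid : (List.range n).map (fun j =>
          if 2 * m < j ∧ j ≤ n - 1 then
            (if 2 * m ≤ j then pvCol N n j (2 * m) ++ [pvBase N (2 * m) + 1 + ((j : Int) - (2 * m : Nat))] else pvCol N n j (2 * m))
              ++ [pvBase N (2 * m) + 1 + ((n : Int) - (2 * m : Nat)) + (((n - 1 : Nat) : Int) - (j : Int))]
          else
            (if 2 * m ≤ j then pvCol N n j (2 * m) ++ [pvBase N (2 * m) + 1 + ((j : Int) - (2 * m : Nat))] else pvCol N n j (2 * m)))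
          = pvGrid N n (2 * (m + 1)) := by
        unfold pvGrid
        apply List.map_congr_left
        intro j hj
        simp only [List.mem_range] at hj
        rcases Nat.lt_trichotomy j (2 * m) with hc | hc | hc
        · have h1 : ¬ (2 * m < j ∧ j ≤ n - 1) := by omega
          have h2 : ¬ (2 * m ≤ j) := by omega
          simp only [h1, h2, if_neg, not_false_iff]
          unfold pvCol
          rw [pv_take_saturate N n j (2 * m) (by omega),
              pv_take_saturate N n j (2 * (m + 1)) (by omega)]
        · have h1 : ¬ (2 * m < j ∧ j ≤ n - 1) := by omega
          have h2 : 2 * m ≤ j := by omega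
          simp only [h1, h2, if_neg, if_pos, not_false_iff]
          have hpush := pv_col_push N n j (2 * m) (by omega)
          rw [if_pos (by omega : (2 * m) % 2 = 0)] at hpush
          rw [hpush]
          unfold pvCol
          rw [pv_take_saturate N n j (2 * m + 1) (by omega),
              pv_take_saturate N n j (2 * (m + 1)) (by omega)]
        · have h1 : 2 * m < j ∧ j ≤ n - 1 := by omega
          have h2 : 2 * m ≤ j := by omega
          simp only [h1, h2, if_pos, and_self]
          have hpush := pv_col_push N n j (2 * m) (by omega)
          rw [if_pos (by omega : (2 * m) % 2 = 0)] at hpush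
          rw [hpush]
          have hpush2 := pv_col_push N n j (2 * m + 1) (by omega)
          rw [if_neg (by omega : ¬ ((2 * m + 1) % 2 = 0))] at hpush2
          have heq2 : pvBase N (2 * m) + 1 + ((n : Int) - ((2 * m : Nat) : Int)) + (((n - 1 : Nat) : Int) - (j : Int))
              = pvBase N (2 * m + 1) + 1 + (N - 1 - (j : Int)) := by
            rw [pvBase]
            push_cast
            omega
          rw [heq2, hpush2]
          have : 2 * m + 1 + 1 = 2 * (m + 1) := by omega
          rw [this]
      rw [hgrid]
      have hrow : ((2 * m : Nat) : Int) + 2 = ((2 * (m + 1) : Nat) : Int) := by push_cast; ring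
      have hcnt : pvBase N (2 * m) + 1 + ((n : Int) - ((2 * m : Nat) : Int)) + (((n - 1 : Nat) : Int) - ((2 * m : Nat) : Int))
          = pvBase N (2 * (m + 1)) + 1 := by
        have e1 : 2 * (m + 1) = (2 * m + 1) + 1 := by omega
        rw [e1, pvBase, pvBase]
        push_cast
        omega
      rw [hrow, hcnt]
      exact ih (m + 1) (by omega) (by omega)
    · have heq : pvBase N (2 * m) = pvBase N n := by
        rcases Nat.eq_or_lt_of_le (Nat.le_of_not_lt h2m) with h | h
        · rw [h]
        · have h1 : 2 * m = n + 1 := by omega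
          rw [h1, pv_pvBase_top N n hN]
      rw [pattern6Loop]
      have hguard : ¬ (pvBase N (2 * m) + 1 < pvBase N n + 1) := by omega
      simp only [hguard, if_neg, not_false_iff]
      exact pv_grid_sat N n (2 * m) (by omega)

lemma pv_append_zeros (n i : Nat) (hi : i < n) (mN : Nat) :
    ∀ (f : Nat → List Int),
    (PySem.List.pyRange 0 ((mN : Nat) : Int) 1).foldl (fun l1 _j =>
        PySem.List.pySetD l1 (i : Int) (PySem.List.pyGetD l1 (i : Int) [] ++ [(0 : Int)]))
      ((List.range n).map f)
    = (List.range n).map (fun j => if j = i then f i ++ List.replicate mN 0 else f j) := by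
  induction mN with
  | zero =>
    intro f
    rw [PySem.List.pyRange_one_eq_nil (by omega)]
    simp only [List.foldl_nil]
    apply List.map_congr_left
    intro j hj
    rcases eq_or_ne j i with h | h <;> simp [h]
  | succ m ih =>
    intro f
    rw [show ((m + 1 : Nat) : Int) = ((m : Nat) : Int) + 1 by push_cast; ring]
    rw [PySem.List.pyRange_one_succ_right (by omega), List.foldl_append]
    rw [ih f]
    simp only [List.foldl_cons, List.foldl_nil]
    rw [show (PySem.List.pyGetD ((List.range n).map
          (fun j => if j = i then f i ++ List.replicate m 0 else f j)) (i : Int) [])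
        = f i ++ List.replicate m 0 by
      simp [PySem.List.pyGetD_natCast, List.getD, List.getElem?_range, hi]]
    rw [show (PySem.List.pySetD ((List.range n).map
          (fun j => if j = i then f i ++ List.replicate m 0 else f j)) (i : Int)
          (f i ++ List.replicate m 0 ++ [0]))
        = (List.range n).map (fun j => if j = i then f i ++ List.replicate m 0 ++ [0]
            else if j = i then f i ++ List.replicate m 0 else f j) by
      simp [PySem.List.pySetD_natCast,
        pv_set_range_map n i (fun j => if j = i then f i ++ List.replicate m 0 else f j) _ hi]]
    apply List.map_congr_left
    intro j hj
    rcases eq_or_ne j i with h | h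
    · simp [h, List.replicate_succ']
    · simp [h]

lemma pv_init_char (N : Int) (n : Nat) (hN : N = (n : Int)) :
    ((PySem.List.pyRange 0 N 1).foldl (fun l1 i =>
      (PySem.List.pyRange 0 (N - i - 1) 1).foldl (fun l1 _j =>
        PySem.List.pySetD l1 i (PySem.List.pyGetD l1 i [] ++ [(0 : Int)])) l1)
      ((PySem.List.pyRange 0 N 1).map (fun _ => ([] : List Int)))) = pvGrid N n 0 := by
  subst hN
  rw [PySem.List.pyRange_zero_natCast, List.foldl_map, List.map_map]
  have aux : ∀ i : Nat, i ≤ n →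
      (List.range i).foldl (fun l1 (k : Nat) =>
        (PySem.List.pyRange 0 (((n : Int)) - (k : Int) - 1) 1).foldl (fun l1 _j =>
          PySem.List.pySetD l1 (k : Int) (PySem.List.pyGetD l1 (k : Int) [] ++ [(0 : Int)])) l1)
        ((List.range n).map (fun _ => ([] : List Int)))
      = (List.range n).map (fun j => if j < i then List.replicate (n - 1 - j) 0 else []) := by
    intro i
    induction i with
    | zero =>
      intro _
      simp only [List.range_zero, List.foldl_nil]
      apply List.map_congr_left
      intro j hj
      simp
    | succ i ih =>
      intro hi
      rw [List.range_succ, List.foldl_append, ih (by omega)]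
      simp only [List.foldl_cons, List.foldl_nil]
      rw [show ((n : Int) - (i : Int) - 1) = ((n - 1 - i : Nat) : Int) by omega]
      rw [pv_append_zeros n i (by omega) (n - 1 - i)]
      apply List.map_congr_left
      intro j hj
      simp only [List.mem_range] at hj
      rcases eq_or_ne j i with h | h
      · subst h
        simp [Nat.lt_irrefl]
      · by_cases h2 : j < i
        · have h3 : j < i + 1 := by omega
          simp [h, h2, h3]
        · have h3 : ¬ (j < i + 1) := by omega
          simp [h, h2, h3]
  simp only [Function.comp_def]
  rw [aux n (le_refl n)]
  unfold pvGrid pvCol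
  apply List.map_congr_left
  intro j hj
  simp only [List.mem_range] at hj
  simp [hj]

lemma pv_base_closed (N : Int) (n : Nat) (hN : N = (n : Int)) :
    ∀ d : Nat, d ≤ n → pvBase N d
      = PySem.Int.floordiv (N * (N + 1)) 2 - PySem.Int.floordiv ((N - d) * (N - d + 1)) 2 := by
  intro d
  induction d with
  | zero =>
    intro _
    rw [pvBase]
    norm_num
  | succ d ih =>
    intro hd
    rw [pvBase, ih (by omega)]
    rw [PySem.Int.floordiv_eq_ediv_of_pos (by norm_num), PySem.Int.floordiv_eq_ediv_of_pos (by norm_num),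
        PySem.Int.floordiv_eq_ediv_of_pos (by norm_num)]
    have hx : (N - ((d + 1 : Nat) : Int)) * (N - ((d + 1 : Nat) : Int) + 1)
        = (N - (d : Int)) * (N - (d : Int) + 1) + (-(N - (d : Int))) * 2 := by
      push_cast; ring
    rw [hx, Int.add_mul_ediv_right _ _ (by norm_num : (2 : Int) ≠ 0)]
    ring

lemma pv_sum_range (k : Nat) :
    (PySem.List.pyRange 0 ((k : Nat) : Int) 1).foldl (fun m i => m + i) 0
      = ((k : Int) * ((k : Int) - 1)) / 2 := by
  induction k with
  | zero =>
    rw [PySem.List.pyRange_one_eq_nil (by omega)]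
    simp
  | succ k ih =>
    rw [show ((k + 1 : Nat) : Int) = ((k : Nat) : Int) + 1 by push_cast; ring]
    rw [PySem.List.pyRange_one_succ_right (by omega), List.foldl_append, ih]
    simp only [List.foldl_cons, List.foldl_nil]
    have : ((k : Int) + 1) * ((k : Int) + 1 - 1) = (k : Int) * ((k : Int) - 1) + (k : Int) * 2 := by
      ring
    rw [this, Int.add_mul_ediv_right _ _ (by norm_num : (2 : Int) ≠ 0)]

lemma pv_maxcnt (N : Int) (n : Nat) (hN : N = (n : Int)) :
    (PySem.List.pyRange 0 (N + 1) 1).foldl (fun m i => m + i) 0 = pvBase N n := by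
  rw [show (N + 1) = ((n + 1 : Nat) : Int) by omega, pv_sum_range (n + 1)]
  rw [pv_base_closed N n hN n (le_refl n)]
  rw [show (N - (n : Int)) = 0 by omega]
  rw [PySem.Int.floordiv_eq_ediv_of_pos (by norm_num), PySem.Int.floordiv_eq_ediv_of_pos (by norm_num)]
  have h1 : ((n + 1 : Nat) : Int) * (((n + 1 : Nat) : Int) - 1) = N * (N + 1) := by
    push_cast; rw [hN]; ring
  rw [h1]
  norm_num

lemma pv_foldl_const {α β : Type} (g : β → β) :
    ∀ (xs : List α) (init : β), xs.foldl (fun st _ => g st) init = g^[xs.length] init := by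
  intro xs
  induction xs with
  | nil => intro init; simp
  | cons x xs ih =>
    intro init
    simp only [List.foldl_cons, List.length_cons, ih (g init), Function.iterate_succ_apply]

lemma pv_pop_some (l : List Int) (h : l ≠ []) :
    PySem.List.pop? l (-1) = some (l.getLastD 0, l.dropLast) := by
  rcases List.eq_nil_or_concat l with hnil | ⟨l', b, rfl⟩
  · exact absurd hnil h
  · rw [List.concat_eq_append, PySem.List.pop?_last, List.getLastD_concat, List.dropLast_concat]

lemma pv_take_last (l : List Int) (i : Nat) (h : i < l.length) :
    (l.take (i + 1)).getLastD 0 = l.getD i 0 ∧ (l.take (i + 1)).dropLast = l.take i := by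
  rw [List.take_succ, List.getElem?_eq_getElem h]
  constructor
  · rw [show (some l[i]).toList = [l[i]] from rfl, List.getLastD_concat]
    simp [List.getD, List.getElem?_eq_getElem h]
  · rw [show (some l[i]).toList = [l[i]] from rfl, List.dropLast_concat]

lemma pv_inner_char (N : Int) (n : Nat) (hN : N = (n : Int)) (f : Nat → List Int)
    (hne : ∀ j, j < n → f j ≠ []) :
    (PySem.List.pyRange 0 N 1).foldl
        (fun (acc : List Int × List (List Int)) j =>
          match PySem.List.pop? (PySem.List.pyGetD acc.2 j []) (-1) with
          | some (v, rest) => (acc.1 ++ [v], PySem.List.pySetD acc.2 j rest)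
          | none => acc) (([] : List Int), (List.range n).map f)
      = ((List.range n).map (fun j => (f j).getLastD 0),
         (List.range n).map (fun j => (f j).dropLast)) := by
  subst hN
  rw [PySem.List.pyRange_zero_natCast, List.foldl_map]
  have aux : ∀ i : Nat, i ≤ n →
      (List.range i).foldl
        (fun (acc : List Int × List (List Int)) (k : Nat) =>
          match PySem.List.pop? (PySem.List.pyGetD acc.2 ((k : Nat) : Int) []) (-1) with
          | some (v, rest) => (acc.1 ++ [v], PySem.List.pySetD acc.2 ((k : Nat) : Int) rest)
          | none => acc) (([] : List Int), (List.range n).map f)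
      = ((List.range i).map (fun j => (f j).getLastD 0),
         (List.range n).map (fun j => if j < i then (f j).dropLast else f j)) := by
    intro i
    induction i with
    | zero =>
      intro _
      simp only [List.range_zero, List.foldl_nil, List.map_nil]
      refine Prod.ext rfl ?_
      simp only
      apply List.map_congr_left
      intro j hj
      simp
    | succ i ih =>
      intro hi
      rw [List.range_succ, List.foldl_append, ih (by omega)]
      simp only [List.foldl_cons, List.foldl_nil]
      have hget : (PySem.List.pyGetD ((List.range n).map
            (fun j => if j < i then (f j).dropLast else f j)) ((i : Nat) : Int) [])
          = f i := by
        simp [PySem.List.pyGetD_natCast, List.getD, List.getElem?_range, (by omega : i < n)]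
      rw [hget, pv_pop_some (f i) (hne i (by omega))]
      simp only
      refine Prod.ext ?_ ?_
      · simp only
        rw [List.map_append, List.map_singleton]
      · simp only
        rw [show (PySem.List.pySetD ((List.range n).map
              (fun j => if j < i then (f j).dropLast else f j)) ((i : Nat) : Int) ((f i).dropLast))
            = (List.range n).map (fun j => if j = i then (f i).dropLast
                else if j < i then (f j).dropLast else f j) by
            simp [PySem.List.pySetD_natCast,
              pv_set_range_map n i (fun j => if j < i then (f j).dropLast else f j) _ (by omega : i < n)]]
        apply List.map_congr_left
        intro j hj
        rcases eq_or_ne j i with h | h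
        · simp [h]
        · by_cases h2 : j < i
          · have h3 : j < i + 1 := by omega
            simp [h, h2, h3]
          · have h3 : ¬ (j < i + 1) := by omega
            simp [h, h2, h3]
  rw [aux n (le_refl n)]
  refine Prod.ext rfl ?_
  simp only
  apply List.map_congr_left
  intro j hj
  simp only [List.mem_range] at hj
  simp [hj]

lemma pv_len_pvCol (N : Int) (n j : Nat) (hj : j < n) : (pvCol N n j n).length = n := by
  unfold pvCol
  rw [List.length_append, List.length_replicate, List.length_take, pv_len_pvApps]
  omega

lemma pv_pop_char (N : Int) (n : Nat) (hN : N = (n : Int)) :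
    ((PySem.List.pyRange (N - 1) (-1) (-1)).foldl (fun st _i =>
      let inner := (PySem.List.pyRange 0 N 1).foldl
        (fun (acc : List Int × List (List Int)) j =>
          match PySem.List.pop? (PySem.List.pyGetD acc.2 j []) (-1) with
          | some (v, rest) => (acc.1 ++ [v], PySem.List.pySetD acc.2 j rest)
          | none => acc) (([] : List Int), st.2)
      (st.1 ++ [inner.1], inner.2)) (([] : List (List Int)), pvGrid N n n)).1
    = (List.range n).map (fun t => (List.range n).map (fun j => (pvCol N n j n).getD (n - 1 - t) 0)) := by
  rw [pv_foldl_const]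
  rw [show (PySem.List.pyRange (N - 1) (-1) (-1)).length = n by
        rw [PySem.List.length_pyRange_neg_one]; omega]
  have aux : ∀ k : Nat, k ≤ n →
      (fun (st : List (List Int) × List (List Int)) =>
        let inner := (PySem.List.pyRange 0 N 1).foldl
          (fun (acc : List Int × List (List Int)) j =>
            match PySem.List.pop? (PySem.List.pyGetD acc.2 j []) (-1) with
            | some (v, rest) => (acc.1 ++ [v], PySem.List.pySetD acc.2 j rest)
            | none => acc) (([] : List Int), st.2)
        (st.1 ++ [inner.1], inner.2))^[k] (([] : List (List Int)), pvGrid N n n)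
      = ((List.range k).map (fun t => (List.range n).map (fun j => (pvCol N n j n).getD (n - 1 - t) 0)),
         (List.range n).map (fun j => (pvCol N n j n).take (n - k))) := by
    intro k
    induction k with
    | zero =>
      intro _
      rw [Function.iterate_zero_apply]
      refine Prod.ext (by simp) ?_
      simp only [pvGrid]
      apply List.map_congr_left
      intro j hj
      simp only [List.mem_range] at hj
      rw [Nat.sub_zero, List.take_of_length_le (by rw [pv_len_pvCol N n j hj])]
    | succ k ih =>
      intro hk
      rw [Function.iterate_succ_apply', ih (by omega)]
      simp only
      have hne : ∀ j, j < n → (fun j => (pvCol N n j n).take (n - k)) j ≠ [] := by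
        intro j hj hnil
        simp only at hnil
        have hlen : ((pvCol N n j n).take (n - k)).length = n - k := by
          rw [List.length_take, pv_len_pvCol N n j hj]
          omega
        rw [hnil] at hlen
        simp at hlen
        omega
      rw [pv_inner_char N n hN _ hne]
      refine Prod.ext ?_ ?_
      · simp only
        rw [List.range_succ, List.map_append, List.map_singleton]
        congr 1
        congr 1
        apply List.map_congr_left
        intro j hj
        simp only [List.mem_range] at hj
        have h1 := (pv_take_last (pvCol N n j n) (n - k - 1)
          (by rw [pv_len_pvCol N n j hj]; omega)).1
        rw [show n - k - 1 + 1 = n - k by omega] at h1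
        rw [h1, show n - k - 1 = n - 1 - k by omega]
      · simp only
        apply List.map_congr_left
        intro j hj
        simp only [List.mem_range] at hj
        have h2 := (pv_take_last (pvCol N n j n) (n - k - 1)
          (by rw [pv_len_pvCol N n j hj]; omega)).2
        rw [show n - k - 1 + 1 = n - k by omega] at h2
        rw [h2, show n - k - 1 = n - (k + 1) by omega]
  have := aux n (le_refl n)
  rw [this]

lemma pv_cell_eq (N : Int) (n : Nat) (hN : N = (n : Int)) (t j : Nat) (ht : t < n) (hj : j < n) :
    (pvCol N n j n).getD (n - 1 - t) 0
      = pattern6AltVal N (PySem.Int.floordiv (N * (N + 1)) 2) (t : Int) (j : Int) := by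
  unfold pvCol
  rw [pv_take_saturate N n j n (by omega)]
  simp only [pattern6AltVal]
  by_cases hc : j < t
  · have hc' : (j : Int) < (t : Int) := by omega
    rw [if_pos hc']
    rw [List.getD_append _ _ _ _ (by rw [List.length_replicate]; omega)]
    rw [List.getD_replicate _ (by omega : n - 1 - t < n - 1 - j)]
  · have hc' : ¬ ((j : Int) < (t : Int)) := by omega
    rw [if_neg hc']
    rw [List.getD_append_right _ _ _ _ (by rw [List.length_replicate]; omega)]
    rw [List.length_replicate, show n - 1 - t - (n - 1 - j) = j - t by omega]
    rw [show (List.getD (pvApps N j) (j - t) 0)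
        = (pvApps N j)[j - t]?.getD 0 from rfl]
    rw [pv_getElem?_pvApps N j (j - t) (by omega)]
    simp only [Option.getD_some]
    rw [show ((j : Int) - (t : Int)) = ((j - t : Nat) : Int) by omega]
    rw [pv_base_closed N n hN (j - t) (by omega)]
    rw [PySem.Int.mod_eq_emod_of_pos (by norm_num : (0 : Int) < 2)]
    by_cases hpar : (j - t) % 2 = 0
    · rw [show (((j - t : Nat) : Int) % 2) = 0 by omega]
      simp only [hpar, if_pos, beq_self_eq_true, if_true]
      omega
    · rw [show (((j - t : Nat) : Int) % 2) = 1 by omega]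
      have h1 : ((1 : Int) == 0) = false := by decide
      rw [h1]
      simp only [hpar, if_neg, if_false, Bool.false_eq_true, not_false_iff]
      omega

-- ===== VERDICT (by name: the statement is the Claim_ definition above) =====
theorem pattern6_spec : Claim_equal_pattern6 := by
  intro N _hdom
  unfold Spec_pattern6
  by_cases hneg : N < 0
  · have h0 : PySem.List.pyRange 0 N 1 = [] := PySem.List.pyRange_one_eq_nil (by omega)
    have h1 : PySem.List.pyRange 0 (N + 1) 1 = [] := PySem.List.pyRange_one_eq_nil (by omega)
    have h2 : PySem.List.pyRange (N - 1) (-1) (-1) = [] := PySem.List.pyRange_neg_one_eq_nil (by omega)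
    simp [pattern6, pattern6_alt, h0, h1, h2, pattern6Loop]
  · have hN : N = (N.toNat : Int) := by omega
    show pattern6 N = pattern6_alt N
    rw [pattern6]
    simp only
    rw [pv_init_char N N.toNat hN, pv_maxcnt N N.toNat hN]
    have hloop := pv_loop_char N N.toNat hN (N.toNat + 1) 0 (by omega) (by omega)
    norm_num [pvBase] at hloop
    rw [hloop, pv_pop_char N N.toNat hN]
    rw [pattern6_alt]
    rw [show PySem.List.pyRange 0 N 1 = (List.range N.toNat).map (fun k => ((k : Nat) : Int)) by
        conv_lhs => rw [hN]
        rw [PySem.List.pyRange_zero_natCast]]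
    rw [List.map_map]
    apply List.map_congr_left
    intro t ht
    simp only [List.mem_range] at ht
    simp only [Function.comp_apply]
    rw [List.map_map]
    apply List.map_congr_left
    intro j hj
    simp only [List.mem_range] at hj
    simp only [Function.comp_apply]
    exact pv_cell_eq N N.toNat hN t j ht hj
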